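-- pv_equiv track=rewrite | github.com/whoiswillma/nlp-experiments | ner.py | extract_nets_from_chunks
-- ===== SOURCE A (Python) =====
-- from typing import TypeVar, Optional, Union
--
-- T = TypeVar("T")
--
-- def extract_nets_from_chunks(
--     tokens: list[str], labels: list[T], null_label: T
-- ) -> list[tuple[str, T]]:
--     named_entity_and_type: list[tuple[str, T]] = []
--
--     current_named_entity = []
--     current_label = null_label
--
--     for token, label in list(zip(tokens, labels)) + [("", null_label)]:
--         if current_label != label:
--             if current_label != null_label:
--                 named_entity_and_type.append(
--                     (" ".join(current_named_entity), current_label)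
--                 )
--             current_named_entity = []
--
--         current_label = label
--         current_named_entity.append(token)
--
--     return named_entity_and_type
-- ===== SOURCE B (Python) =====
-- def extract_nets_from_chunks(tokens, labels, null_label):
--     # Run-based scan: two indices find each maximal run of equal labels; non-null runs are emitted.
--     result = []
--     pairs = list(zip(tokens, labels))
--     n = len(pairs)
--     i = 0
--     while i < n:
--         lab = pairs[i][1]
--         j = i + 1
--         while j < n and pairs[j][1] == lab:
--             j += 1
--         if lab != null_label:
--             result.append((" ".join(pairs[p][0] for p in range(i, j)), lab))
--         i = j
--     return result
-- ===== Notes on version B (the rewrite author's own statement) =====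
-- stated objective: alternative
-- what changed: Replaces A's sentinel-terminated accumulator state machine (current_label/current_named_entity carried across iterations, flushed on label change and by an appended ('', null_label) sentinel) with a run-based scan that repeatedly takes the maximal prefix run of equal labels and emits it directly, with no sentinel and no carried state.
import Mathlib
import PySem

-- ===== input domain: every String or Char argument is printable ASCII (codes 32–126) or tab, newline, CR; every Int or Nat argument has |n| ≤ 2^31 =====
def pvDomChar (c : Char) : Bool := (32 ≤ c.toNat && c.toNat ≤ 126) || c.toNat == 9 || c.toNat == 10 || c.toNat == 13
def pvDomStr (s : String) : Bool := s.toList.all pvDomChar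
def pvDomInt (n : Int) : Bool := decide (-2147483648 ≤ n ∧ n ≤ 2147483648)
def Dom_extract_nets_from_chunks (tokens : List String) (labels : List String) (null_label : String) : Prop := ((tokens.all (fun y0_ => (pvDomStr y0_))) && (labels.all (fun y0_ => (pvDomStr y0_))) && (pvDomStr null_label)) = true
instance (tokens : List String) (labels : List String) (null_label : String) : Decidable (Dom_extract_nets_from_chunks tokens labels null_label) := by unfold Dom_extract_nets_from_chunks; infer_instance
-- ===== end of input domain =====

-- Equivalence of two NE-chunk extractors: A's sentinel/accumulator state machine vs B's
-- run-based maximal-prefix scan (alternative decomposition, same O(n) cost).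


-- ===== PORT A =====
-- one loop step of A: state = (named_entity_and_type, current_named_entity, current_label)
def pvStepA (null_label : String)
    (s : List (String × String) × List String × String) (p : String × String) :
    List (String × String) × List String × String :=
  let res := s.1; let ne := s.2.1; let lab := s.2.2
  let token := p.1; let label := p.2
  if lab ≠ label then
    let res' := if lab ≠ null_label then res ++ [(PySem.Str.join " " ne, lab)] else res
    (res', ([] : List String) ++ [token], label)
  else
    (res, ne ++ [token], label)

def extract_nets_from_chunks (tokens : List String) (labels : List String) (null_label : String) : List (String × String) :=
  ((tokens.zip labels ++ [("", null_label)]).foldl (pvStepA null_label)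
    (([] : List (String × String)), ([] : List String), null_label)).1

-- ===== PORT B =====
-- runs over the pair list: take the maximal prefix run of equal labels, emit if non-null, recurse
def pvRunsB (null_label : String) : List (String × String) → List (String × String)
  | [] => []
  | (t, lab) :: rest =>
    let runToks := t :: (rest.takeWhile (fun p => p.2 == lab)).map Prod.fst
    let rest' := rest.dropWhile (fun p => p.2 == lab)
    (if lab ≠ null_label then [(PySem.Str.join " " runToks, lab)] else []) ++ pvRunsB null_label rest'
termination_by ps => ps.length
decreasing_by
  exact Nat.lt_succ_of_le (List.length_dropWhile_le _ _)

def extract_nets_from_chunks_alt (tokens : List String) (labels : List String) (null_label : String) : List (String × String) :=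
  pvRunsB null_label (tokens.zip labels)

-- ===== PRECONDITION & SPEC =====
def Spec_extract_nets_from_chunks (tokens : List String) (labels : List String) (null_label : String) (out : List (String × String)) : Prop := out = extract_nets_from_chunks_alt tokens labels null_label
instance (tokens : List String) (labels : List String) (null_label : String) (out : List (String × String)) : Decidable (Spec_extract_nets_from_chunks tokens labels null_label out) := by unfold Spec_extract_nets_from_chunks; infer_instance

-- ===== CLAIM (what is proved, stated in full; the proofs are below) =====
def Claim_equal_extract_nets_from_chunks : Prop := ∀ (tokens : List String) (labels : List String) (null_label : String), Dom_extract_nets_from_chunks tokens labels null_label → Spec_extract_nets_from_chunks tokens labels null_label (extract_nets_from_chunks tokens labels null_label)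

-- ===== LEMMAS AND PROOFS =====

-- generalized residual computation of A's loop: pending tokens ne under label lab, remaining pairs
def pvGo (null_label : String) (ne : List String) (lab : String) : List (String × String) → List (String × String)
  | [] => if lab ≠ null_label then [(PySem.Str.join " " ne, lab)] else []
  | (t, l) :: rest =>
    if lab ≠ l then
      (if lab ≠ null_label then [(PySem.Str.join " " ne, lab)] else []) ++ pvGo null_label [t] l rest
    else
      pvGo null_label (ne ++ [t]) lab rest

theorem pvFold_eq_go (null_label : String) (pairs : List (String × String)) :
    ∀ (res : List (String × String)) (ne : List String) (lab : String),
      ((pairs ++ [("", null_label)]).foldl (pvStepA null_label) (res, ne, lab)).1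
        = res ++ pvGo null_label ne lab pairs := by
  induction pairs with
  | nil =>
    intro res ne lab
    simp only [List.nil_append, List.foldl_cons, List.foldl_nil, pvStepA, pvGo]
    by_cases h : lab = null_label
    · simp [h]
    · simp [h]
  | cons p rest ih =>
    intro res ne lab
    obtain ⟨t, l⟩ := p
    rw [List.cons_append, List.foldl_cons]
    by_cases h : lab = l
    · have hs : pvStepA null_label (res, ne, lab) (t, l) = (res, ne ++ [t], l) := by
        simp [pvStepA, h]
      rw [hs, ih]
      simp [pvGo, h]
    · by_cases hn : lab = null_label
      · subst hn
        have hs : pvStepA lab (res, ne, lab) (t, l) = (res, [t], l) := by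
          simp [pvStepA, h]
        rw [hs, ih]
        simp [pvGo, h]
      · have hs : pvStepA null_label (res, ne, lab) (t, l)
            = (res ++ [(PySem.Str.join " " ne, lab)], [t], l) := by
          simp [pvStepA, h, hn]
        rw [hs, ih]
        simp [pvGo, h, hn, List.append_assoc]

theorem pvGo_eq_runs (null_label : String) (pairs : List (String × String)) :
    ∀ (ne : List String) (lab : String),
      pvGo null_label ne lab pairs
        = (if lab ≠ null_label then
            [(PySem.Str.join " " (ne ++ (pairs.takeWhile (fun p => p.2 == lab)).map Prod.fst), lab)]
           else [])
          ++ pvRunsB null_label (pairs.dropWhile (fun p => p.2 == lab)) := by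
  induction pairs with
  | nil =>
    intro ne lab
    simp [pvGo, pvRunsB]
  | cons p rest ih =>
    intro ne lab
    obtain ⟨t, l⟩ := p
    by_cases h : l = lab
    · subst h
      simp only [pvGo, List.takeWhile_cons, List.dropWhile_cons, beq_self_eq_true,
        if_pos, ite_not]
      rw [ih]
      simp [List.append_assoc]
    · have hne : lab ≠ l := fun hh => h hh.symm
      simp only [pvGo, if_pos hne, List.takeWhile_cons, List.dropWhile_cons]
      have hb : ((t, l).2 == lab) = false := by simpa using h
      rw [ih]
      simp [pvRunsB, hb]

-- ===== VERDICT (by name: the statement is the Claim_ definition above) =====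
theorem extract_nets_from_chunks_spec : Claim_equal_extract_nets_from_chunks := by
  intro tokens labels null_label _
  unfold Spec_extract_nets_from_chunks extract_nets_from_chunks extract_nets_from_chunks_alt
  rw [pvFold_eq_go, pvGo_eq_runs]
  simp only [ne_eq, not_true_eq_false, if_neg, List.nil_append, not_false_eq_true]
  cases hp : tokens.zip labels with
  | nil => simp [pvRunsB]
  | cons p rest =>
    obtain ⟨t, l⟩ := p
    by_cases h : l = null_label
    · subst h
      simp [pvRunsB]
    · have hb : ((t, l).2 == null_label) = false := by simpa using h
      simp [hb]
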